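-- pv_equiv track=rewrite | github.com/zoloypzuo/ZeloLua | zasm.py | split_punc
-- ===== SOURCE A (Python) =====
-- def split_punc(text):
--     """after split src with whitespace(so {parameter}text will not contain whitespace),
--     split with punctuation such that 'a,b' => ('a',',','b'), note that there is no space between 'a' and ','"""
--     index0 = 0
--     index1 = 0
--     ret = []
--     while True:
--         if index1 >= len(text): break
--         if text[index1] not in ':,{}()':
--             pass  # text[index1] is not punc
--         else:  # text[index1] is punc, lex the lexeme and punc and add to ret
--             lexeme = text[index0:index1]
--             if lexeme:  # tiny bug emerge when successive punc like '){' in 'Func _Main(1,2){', lexeme is '' which should not be added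
--                 ret.append(lexeme)
--             ret.append(text[index1])
--             index0 = index1 + 1  # move index0 to index1
--         index1 += 1
--     remainder = text[index0:]
--     if remainder:
--         ret.append(remainder)  # the last lexeme may not be appended, so append it
--     return ret
-- ===== SOURCE B (Python) =====
-- def split_punc(text):
--     """Maximal-run tokenizer: emit each punctuation char as its own token and each
--     maximal run of non-punctuation chars as a token, in one forward scan."""
--     tokens = []
--     i, n = 0, len(text)
--     while i < n:
--         if text[i] in ':,{}()':
--             tokens.append(text[i])
--             i += 1
--         else:
--             j = i
--             while j < n and text[j] not in ':,{}()':
--                 j += 1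
--             tokens.append(text[i:j])
--             i = j
--     return tokens
-- ===== Notes on version B (the rewrite author's own statement) =====
-- stated objective: simpler
-- what changed: Replaces A's two-index lexeme/remainder bookkeeping (pending-lexeme start index, conditional flush at each delimiter, trailing-remainder fixup after the loop) with a direct maximal-run tokenizer: each step emits either one punctuation char or the whole maximal non-punctuation run, so no pending state or post-loop patch-up exists.
import Mathlib
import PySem

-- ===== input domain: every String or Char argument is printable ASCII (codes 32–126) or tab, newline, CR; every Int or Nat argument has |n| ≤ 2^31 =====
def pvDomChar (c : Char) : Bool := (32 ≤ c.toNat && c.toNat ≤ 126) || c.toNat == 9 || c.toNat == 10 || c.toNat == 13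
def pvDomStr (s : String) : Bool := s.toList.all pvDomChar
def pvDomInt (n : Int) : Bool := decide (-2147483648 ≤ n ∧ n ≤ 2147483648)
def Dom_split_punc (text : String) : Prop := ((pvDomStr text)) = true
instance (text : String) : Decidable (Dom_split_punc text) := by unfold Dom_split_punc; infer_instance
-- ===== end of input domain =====

-- B replaces A's two-index lexeme/remainder bookkeeping with a plain maximal-run scan (simpler; same return value).

-- `c in ':,{}()'` (the character test both Pythons perform)
def isPunc (c : Char) : Bool := [':', ',', '{', '}', '(', ')'].contains c

-- ===== PORT A =====
-- A's while loop over index1 with state (index0, ret); the slices text[index0:index1] and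
-- text[index0:] are exact as take/drop here because the loop only reaches states with
-- 0 ≤ index0 ≤ index1 ≤ len(text).
def splitPuncLoopA (text : List Char) (index0 index1 : Nat) (ret : List (List Char)) : List (List Char) :=
  if h : index1 ≥ text.length then
    -- loop exits; append the remainder if non-empty
    let remainder := text.drop index0
    if remainder.isEmpty then ret else ret ++ [remainder]
  else
    if isPunc (text[index1]'(by omega)) then
      let lexeme := (text.take index1).drop index0
      let ret' := (if lexeme.isEmpty then ret else ret ++ [lexeme]) ++ [[text[index1]'(by omega)]]
      splitPuncLoopA text (index1 + 1) (index1 + 1) ret'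
    else
      splitPuncLoopA text index0 (index1 + 1) ret
termination_by text.length - index1

def split_punc (text : String) : List String :=
  (splitPuncLoopA text.toList 0 0 []).map String.ofList

-- ===== PORT B =====
-- B's outer while loop: one token per step — a single punc char, or the maximal non-punc run
-- (B's inner `while j < n and …` scan plus the slice text[i:j] is this takeWhile/dropWhile pair).
def splitPuncRunsB (l : List Char) : List (List Char) :=
  match l with
  | [] => []
  | c :: rest =>
    if isPunc c then
      [c] :: splitPuncRunsB rest
    else
      (c :: rest).takeWhile (fun x => !isPunc x) :: splitPuncRunsB ((c :: rest).dropWhile (fun x => !isPunc x))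
termination_by l.length
decreasing_by
  · simp
  · rename_i h
    rw [List.dropWhile_cons]
    simp [h]
    exact List.length_dropWhile_le _ _

def split_punc_alt (text : String) : List String :=
  (splitPuncRunsB text.toList).map String.ofList

-- ===== PRECONDITION & SPEC =====
def Spec_split_punc (text : String) (out : List String) : Prop := out = split_punc_alt text
instance (text : String) (out : List String) : Decidable (Spec_split_punc text out) := by unfold Spec_split_punc; infer_instance

-- ===== CLAIM (what is proved, stated in full; the proofs are below) =====
def Claim_equal_split_punc : Prop := ∀ (text : String), Dom_split_punc text → Spec_split_punc text (split_punc text)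

-- ===== LEMMAS AND PROOFS =====

-- On an all-non-punc list, B emits the whole list as one run (or nothing if empty).
lemma runsB_all_nonpunc (l : List Char) (h : ∀ x ∈ l, isPunc x = false) :
    splitPuncRunsB l = if l.isEmpty then [] else [l] := by
  cases l with
  | nil => simp [splitPuncRunsB]
  | cons c rest =>
    have hc : isPunc c = false := h c (by simp)
    rw [splitPuncRunsB]
    rw [List.takeWhile_eq_self_iff.mpr (by intro x hx; simp [h x hx]),
        List.dropWhile_eq_nil_iff.mpr (by intro x hx; simp [h x hx])]
    simp [hc, splitPuncRunsB]

-- takeWhile/dropWhile of (non-punc run) ++ punc :: rest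
lemma takeWhile_pre_punc (c : Char) (rest : List Char) (hc : isPunc c = true) :
    ∀ (pre : List Char), (∀ x ∈ pre, isPunc x = false) →
    (pre ++ c :: rest).takeWhile (fun x => !isPunc x) = pre := by
  intro pre hpre
  induction pre with
  | nil => simp [hc]
  | cons p ps ih =>
    have hp : isPunc p = false := hpre p (by simp)
    simp only [List.cons_append, List.takeWhile_cons, hp]
    simp [ih (fun x hx => hpre x (by simp [hx]))]

lemma dropWhile_pre_punc (c : Char) (rest : List Char) (hc : isPunc c = true) :
    ∀ (pre : List Char), (∀ x ∈ pre, isPunc x = false) →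
    (pre ++ c :: rest).dropWhile (fun x => !isPunc x) = c :: rest := by
  intro pre hpre
  induction pre with
  | nil => simp [hc]
  | cons p ps ih =>
    have hp : isPunc p = false := hpre p (by simp)
    simp only [List.cons_append, List.dropWhile_cons, hp]
    simp [ih (fun x hx => hpre x (by simp [hx]))]

-- On (non-punc run) ++ punc :: rest, B emits the run (if non-empty), then the punc, then recurses.
lemma runsB_pre_punc (c : Char) (rest : List Char) (hc : isPunc c = true) :
    ∀ (pre : List Char), (∀ x ∈ pre, isPunc x = false) →
    splitPuncRunsB (pre ++ c :: rest) =
      (if pre.isEmpty then [] else [pre]) ++ [c] :: splitPuncRunsB rest := by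
  intro pre hpre
  cases pre with
  | nil => simp [splitPuncRunsB, hc]
  | cons p ps =>
    have hp : isPunc p = false := hpre p (by simp)
    rw [List.cons_append, splitPuncRunsB]
    rw [← List.cons_append, takeWhile_pre_punc c rest hc _ hpre,
        dropWhile_pre_punc c rest hc _ hpre]
    simp [hp, splitPuncRunsB, hc]

-- Loop invariant: with all of text[index0:index1] non-punc, A's loop appends to ret
-- exactly B's tokens of text[index0:].
lemma loopA_eq_runsB (n : Nat) : ∀ (text : List Char) (i0 i1 : Nat) (ret : List (List Char)),
    text.length - i1 = n → i0 ≤ i1 → i1 ≤ text.length →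
    (∀ x ∈ (text.take i1).drop i0, isPunc x = false) →
    splitPuncLoopA text i0 i1 ret = ret ++ splitPuncRunsB (text.drop i0) := by
  induction n with
  | zero =>
    intro text i0 i1 ret hn h01 h1len hnp
    have h1 : i1 = text.length := by omega
    rw [splitPuncLoopA]
    have htake : text.take i1 = text := by simp [h1]
    rw [dif_pos (by omega)]
    have : ∀ x ∈ text.drop i0, isPunc x = false := by
      intro x hx; exact hnp x (by rwa [htake])
    rw [runsB_all_nonpunc _ this]
    by_cases he : (text.drop i0).isEmpty <;> simp [he]
  | succ n ih =>
    intro text i0 i1 ret hn h01 h1len hnp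
    have h1 : i1 < text.length := by omega
    rw [splitPuncLoopA, dif_neg (by omega)]
    have h0 : i0 - (text.take i1).length = 0 := by simp [List.length_take]; omega
    have hdecomp : text.drop i0 = (text.take i1).drop i0 ++ text[i1] :: text.drop (i1 + 1) := by
      conv_lhs => rw [← List.take_append_drop i1 text]
      rw [List.drop_append, h0, List.drop_zero, List.drop_eq_getElem_cons h1]
    by_cases hp : isPunc (text[i1]'h1)
    · rw [if_pos hp]
      rw [ih text (i1 + 1) (i1 + 1) _ (by omega) (Nat.le_refl _) (by omega) (by simp)]
      rw [hdecomp, runsB_pre_punc _ _ hp _ hnp]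
      by_cases he : ((text.take i1).drop i0).isEmpty <;> simp [he]
    · rw [if_neg hp]
      refine ih text i0 (i1 + 1) ret (by omega) (by omega) (by omega) ?_
      intro x hx
      rw [List.take_add_one, List.drop_append, h0, List.drop_zero] at hx
      rcases List.mem_append.mp hx with h | h
      · exact hnp x h
      · have hxe : x = text[i1] := by simpa [List.getElem?_eq_getElem h1] using h
        simpa [hxe] using hp

-- ===== VERDICT (by name: the statement is the Claim_ definition above) =====
theorem split_punc_spec : Claim_equal_split_punc := by
  intro text _
  unfold Spec_split_punc split_punc split_punc_alt
  rw [loopA_eq_runsB (text.toList.length) text.toList 0 0 [] rfl (Nat.le_refl 0) (Nat.zero_le _) (by simp)]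
  simp
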